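-- pv_equiv track=rewrite | github.com/dnnijmlinn/Python-mooc-2021 | osa03-19_vuorotellen/test/test_vuorotellen.py | get_correct
-- ===== SOURCE A (Python) =====
-- def get_correct(n : int) -> str:
--     c1 = 1
--     c2 = n
--     l = []
--
--     while c1 <= c2:
--         if c1 <= c2:
--             l.append(c1)
--             c1 += 1
--         if c2 >= c1:
--             l.append(c2)
--             c2 -= 1
--
--     return "\n".join([str(x) for x in l])
-- ===== SOURCE B (Python) =====
-- def get_correct(n: int) -> str:
--     front = list(range(1, (n + 1) // 2 + 1))
--     back = list(range(n, (n + 1) // 2, -1))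
--     out = []
--     for a, b in zip(front, back):
--         out.append(a)
--         out.append(b)
--     out.extend(front[len(back):])
--     return "\n".join(str(x) for x in out)
-- ===== Notes on version B (the rewrite author's own statement) =====
-- stated objective: idiomatic
-- what changed: B replaces A's while loop with two converging pointers by building the ascending front half and the descending back half with range(), zipping them pairwise and appending the leftover middle element for odd lengths.
import Mathlib
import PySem

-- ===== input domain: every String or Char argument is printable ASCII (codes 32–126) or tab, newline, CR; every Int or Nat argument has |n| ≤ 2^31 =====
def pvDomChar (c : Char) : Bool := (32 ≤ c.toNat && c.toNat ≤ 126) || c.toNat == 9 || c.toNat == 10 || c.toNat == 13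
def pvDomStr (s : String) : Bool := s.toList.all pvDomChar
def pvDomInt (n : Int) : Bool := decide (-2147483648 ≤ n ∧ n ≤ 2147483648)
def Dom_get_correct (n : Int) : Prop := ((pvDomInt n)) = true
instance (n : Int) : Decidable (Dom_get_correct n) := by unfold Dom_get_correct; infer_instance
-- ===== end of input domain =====

-- B builds the two monotone halves 1..ceil(n/2) and n..floor(n/2)+1 with range() and zips
-- them instead of A's two converging pointers; objective: more idiomatic (same cost).

-- ===== PORT A =====
-- A's while loop; the first inner `if c1 <= c2` repeats the loop guard (always true
-- inside the body), so its else-branch is unreachable and the two ifs are transcribed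
-- as one nested conditional with the same appends in the same order.
-- fuel only makes the recursion structural: c2 - c1 + 1 shrinks each iteration, so
-- fuel = (c2 - c1 + 1).toNat at the call site is enough and the 0-case is never the result.
def loopA (fuel : Nat) (c1 c2 : Int) (l : List Int) : List Int :=
  match fuel with
  | 0 => l
  | fuel + 1 =>
    if c1 ≤ c2 then
      if c2 ≥ c1 + 1 then loopA fuel (c1 + 1) (c2 - 1) (l ++ [c1] ++ [c2])
      else loopA fuel (c1 + 1) c2 (l ++ [c1])
    else l

def get_correct (n : Int) : String :=
  PySem.Str.join "\n" ((loopA (n - 1 + 1).toNat 1 n []).map PySem.Int.toStr)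

-- ===== PORT B =====
def get_correct_alt (n : Int) : String :=
  let front := PySem.List.pyRange 1 (PySem.Int.floordiv (n + 1) 2 + 1) 1
  let back := PySem.List.pyRange n (PySem.Int.floordiv (n + 1) 2) (-1)
  let out := (front.zip back).foldl (fun acc p => acc ++ [p.1, p.2]) []
  let out := out ++ PySem.List.slice front (some (back.length : Int)) none
  PySem.Str.join "\n" (out.map PySem.Int.toStr)

-- ===== PRECONDITION & SPEC =====
def Spec_get_correct (n : Int) (out : String) : Prop := out = get_correct_alt n
instance (n : Int) (out : String) : Decidable (Spec_get_correct n out) := by unfold Spec_get_correct; infer_instance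

-- ===== CLAIM (what is proved, stated in full; the proofs are below) =====
def Claim_equal_get_correct : Prop := ∀ (n : Int), Dom_get_correct n → Spec_get_correct n (get_correct n)

-- ===== LEMMAS AND PROOFS =====

-- ascending run a, a+1, …, a+k-1
def upL (a : Int) : Nat → List Int
  | 0 => []
  | k + 1 => a :: upL (a + 1) k

-- descending run b, b-1, …, b-k+1
def downL (b : Int) : Nat → List Int
  | 0 => []
  | k + 1 => b :: downL (b - 1) k

-- the interleaving a, b, a+1, b-1, … (k pairs)
def ilv (a b : Int) : Nat → List Int
  | 0 => []
  | k + 1 => a :: b :: ilv (a + 1) (b - 1) k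

theorem upL_length (a : Int) (k : Nat) : (upL a k).length = k := by
  induction k generalizing a with
  | zero => rfl
  | succ k ih => simp [upL, ih]

theorem upL_succ_right (a : Int) (k : Nat) : upL a (k + 1) = upL a k ++ [a + k] := by
  induction k generalizing a with
  | zero => simp [upL]
  | succ k ih =>
    rw [upL, ih (a + 1), upL]
    simp; ring_nf

theorem upRange (k : Nat) (a : Int) : PySem.List.pyRange a (a + (k : Int)) 1 = upL a k := by
  induction k generalizing a with
  | zero => rw [upL, PySem.List.pyRange_one_eq_nil (by omega)]
  | succ k ih =>
    rw [PySem.List.pyRange_one_cons (by omega), upL,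
      show a + ((k + 1 : Nat) : Int) = a + 1 + (k : Int) by push_cast; ring, ih (a + 1)]

theorem downRange (k : Nat) (b : Int) : PySem.List.pyRange b (b - (k : Int)) (-1) = downL b k := by
  induction k generalizing b with
  | zero => rw [downL, PySem.List.pyRange_neg_one_eq_nil (by omega)]
  | succ k ih =>
    rw [PySem.List.pyRange_neg_one_cons (by omega), downL,
      show b - ((k + 1 : Nat) : Int) = b - 1 - (k : Int) by push_cast; ring, ih (b - 1)]

theorem downL_length (b : Int) (k : Nat) : (downL b k).length = k := by
  induction k generalizing b with
  | zero => rfl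
  | succ k ih => simp [downL, ih]

theorem zipFlat (k : Nat) (a b : Int) (extra : List Int) :
    ((upL a k ++ extra).zip (downL b k)).flatMap (fun p => [p.1, p.2]) = ilv a b k := by
  induction k generalizing a b with
  | zero => simp [upL, downL, ilv]
  | succ k ih =>
    have h := ih (a + 1) (b - 1)
    simp only [List.zip] at h ⊢
    simp [upL, downL, ilv, h]

theorem loopA_even (k : Nat) : ∀ (f : Nat) (a b : Int) (acc : List Int), k ≤ f →
    b - a + 1 = 2 * (k : Int) → loopA f a b acc = acc ++ ilv a b k := by
  induction k with
  | zero =>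
    intro f a b acc _ h
    cases f with
    | zero => simp [loopA, ilv]
    | succ f => rw [loopA, if_neg (by omega)]; simp [ilv]
  | succ k ih =>
    intro f a b acc hf h
    obtain ⟨f, rfl⟩ : ∃ f', f = f' + 1 := ⟨f - 1, by omega⟩
    rw [loopA, if_pos (by omega), if_pos (by omega),
      ih f (a + 1) (b - 1) _ (by omega) (by push_cast at h ⊢; omega)]
    simp [ilv]

theorem loopA_odd (k : Nat) : ∀ (f : Nat) (a b : Int) (acc : List Int), k + 1 ≤ f →
    b - a + 1 = 2 * (k : Int) + 1 → loopA f a b acc = acc ++ ilv a b k ++ [a + (k : Int)] := by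
  induction k with
  | zero =>
    intro f a b acc hf h
    have hab : a = b := by omega
    obtain ⟨f, rfl⟩ : ∃ f', f = f' + 1 := ⟨f - 1, by omega⟩
    rw [loopA, if_pos (by omega), if_neg (by omega)]
    cases f with
    | zero => simp [loopA, ilv, hab]
    | succ f => rw [loopA, if_neg (by omega)]; simp [ilv, hab]
  | succ k ih =>
    intro f a b acc hf h
    obtain ⟨f, rfl⟩ : ∃ f', f = f' + 1 := ⟨f - 1, by omega⟩
    rw [loopA, if_pos (by omega), if_pos (by omega),
      ih f (a + 1) (b - 1) _ (by omega) (by push_cast at h ⊢; omega)]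
    simp [ilv]
    omega

-- the list B builds equals the list A builds
theorem lists_eq (n : Int) :
    (let front := PySem.List.pyRange 1 (PySem.Int.floordiv (n + 1) 2 + 1) 1
     let back := PySem.List.pyRange n (PySem.Int.floordiv (n + 1) 2) (-1)
     (front.zip back).foldl (fun acc p => acc ++ [p.1, p.2]) []
       ++ PySem.List.slice front (some (back.length : Int)) none) = loopA (n - 1 + 1).toNat 1 n [] := by
  have hq : PySem.Int.floordiv (n + 1) 2 = (n + 1) / 2 :=
    PySem.Int.floordiv_eq_ediv_of_pos (by omega)
  rw [hq]
  simp only [PySem.List.foldl_append_eq_flatMap, List.nil_append]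
  by_cases hn : n ≤ 0
  · -- both halves empty, A's loop returns immediately
    rw [PySem.List.pyRange_one_eq_nil (by omega), PySem.List.pyRange_neg_one_eq_nil (by omega),
      show (n - 1 + 1).toNat = 0 by omega]
    simp [loopA, PySem.List.slice]
  · -- n ≥ 1; set q = (n+1)//2, m = n - q = n//2
    obtain ⟨m, hm⟩ : ∃ m : Nat, (m : Int) = n - (n + 1) / 2 := ⟨(n - (n + 1) / 2).toNat, Int.toNat_of_nonneg (by omega)⟩
    have hback : PySem.List.pyRange n ((n + 1) / 2) (-1) = downL n m := by
      rw [show (n + 1) / 2 = n - (m : Int) by omega]; exact downRange m n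
    rw [hback]
    rw [downL_length]
    rcases (by omega : (n + 1) / 2 = (m : Int) ∨ (n + 1) / 2 = (m : Int) + 1) with hq2 | hq2
    · -- n even: front and back both have m elements, no leftover
      have hfront : PySem.List.pyRange 1 ((n + 1) / 2 + 1) 1 = upL 1 m := by
        rw [show (n + 1) / 2 + 1 = 1 + (m : Int) by omega]; exact upRange m 1
      rw [hfront, loopA_even m (n - 1 + 1).toNat 1 n [] (by omega) (by omega)]
      have : PySem.List.slice (upL 1 m) (some (m : Int)) none = [] := by
        rw [PySem.List.slice_from_natCast]
        simp [upL_length]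
      rw [this, List.append_nil, List.nil_append,
        show upL 1 m = upL 1 m ++ [] by simp, zipFlat]
    · -- n odd: front has one extra element 1+m, taken by the slice
      have hfront : PySem.List.pyRange 1 ((n + 1) / 2 + 1) 1 = upL 1 (m + 1) := by
        rw [show (n + 1) / 2 + 1 = 1 + ((m : Int) + 1) by omega]
        exact_mod_cast upRange (m + 1) 1
      rw [hfront, loopA_odd m (n - 1 + 1).toNat 1 n [] (by omega) (by omega), upL_succ_right]
      have : PySem.List.slice (upL 1 m ++ [1 + (m : Int)]) (some (m : Int)) none
          = [1 + (m : Int)] := by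
        rw [PySem.List.slice_from_natCast]
        simp [upL_length]
      rw [this, zipFlat]
      simp

-- ===== VERDICT (by name: the statement is the Claim_ definition above) =====
theorem get_correct_spec : Claim_equal_get_correct := by
  intro n _
  unfold Spec_get_correct get_correct get_correct_alt
  rw [← lists_eq n]
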